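-- pv_equiv track=rewrite | github.com/A3V1/B2B-RFP | app/services/extractor.py | _remove_repeated_headers
-- ===== SOURCE A (Python) =====
-- from typing import List
--
-- def _remove_repeated_headers(page_lines_list: List[List[str]]) -> List[str]:
--     header_counts = {}
--     footer_counts = {}
--     pages = len(page_lines_list)
--     for lines in page_lines_list:
--         if not lines:
--             continue
--         top = lines[0][:120].strip()
--         bottom = lines[-1][:120].strip()
--         if top:
--             header_counts[top] = header_counts.get(top, 0) + 1
--         if bottom:
--             footer_counts[bottom] = footer_counts.get(bottom, 0) + 1
--     headers_to_remove = {h for h, c in header_counts.items() if c > max(1, pages//2)}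
--     footers_to_remove = {f for f, c in footer_counts.items() if c > max(1, pages//2)}
--     out = []
--     for lines in page_lines_list:
--         for i, l in enumerate(lines):
--             if i == 0 and l in headers_to_remove:
--                 continue
--             if i == len(lines)-1 and l in footers_to_remove:
--                 continue
--             out.append(l)
--     return out
-- ===== SOURCE B (Python) =====
-- from typing import List
--
-- def _remove_repeated_headers(page_lines_list: List[List[str]]) -> List[str]:
--     thr = max(1, len(page_lines_list) // 2)
--
--     def frequent(keys):
--         keys = sorted(keys)
--         freq = set()
--         i = 0
--         while i < len(keys):
--             j = i + 1
--             while j < len(keys) and keys[j] == keys[i]: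
--                 j += 1
--             if keys[i] and j - i > thr:
--                 freq.add(keys[i])
--             i = j
--         return freq
--
--     nonempty = [lines for lines in page_lines_list if lines]
--     heads = frequent([lines[0][:120].strip() for lines in nonempty])
--     feet = frequent([lines[-1][:120].strip() for lines in nonempty])
--
--     out = []
--     for lines in nonempty:
--         start = 1 if lines[0] in heads else 0
--         end = len(lines) - (1 if lines[-1] in feet else 0)
--         out.extend(lines[start:end])
--     return out
-- ===== Notes on version B (the rewrite author's own statement) =====
-- stated objective: alternative
-- what changed: Frequent header/footer keys are found by sorting each key list and scanning runs of equal keys (instead of A's incremental hash-count dicts turned into threshold sets), and they are removed with a per-page slice lines[start:end] over the pre-filtered non-empty pages (instead of A's per-line enumerate-and-skip loop).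
import Mathlib
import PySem

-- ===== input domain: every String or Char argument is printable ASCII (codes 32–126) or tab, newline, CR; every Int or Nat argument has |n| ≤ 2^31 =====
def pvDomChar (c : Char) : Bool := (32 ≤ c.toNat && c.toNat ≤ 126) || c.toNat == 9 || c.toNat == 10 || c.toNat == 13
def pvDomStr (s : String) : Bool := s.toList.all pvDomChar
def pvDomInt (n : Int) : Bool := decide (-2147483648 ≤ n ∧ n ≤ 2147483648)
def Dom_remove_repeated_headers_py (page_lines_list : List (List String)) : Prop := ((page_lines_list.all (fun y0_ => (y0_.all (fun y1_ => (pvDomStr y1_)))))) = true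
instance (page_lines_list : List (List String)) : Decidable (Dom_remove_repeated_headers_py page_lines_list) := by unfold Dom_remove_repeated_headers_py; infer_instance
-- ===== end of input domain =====

-- B finds the frequent header/footer keys by sorting the key list and scanning its runs (instead of
-- A's hash-count dicts + set comprehensions) and removes them with a per-page slice (instead of A's
-- per-line indexed filter loop); objective: alternative, same observable behaviour.

-- l[:120].strip() — the key both Pythons compute from a page's first/last line
def pvKey (s : String) : String := PySem.Str.strip (PySem.Str.slice s none (some 120))

-- ===== PORT A =====
-- the body of A's first loop (counting headers/footers into the two dicts)
def pvStep (st : PySem.Dict String Int × PySem.Dict String Int) (lines : List String) :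
    PySem.Dict String Int × PySem.Dict String Int :=
  if lines.isEmpty then st
  else
    let top := pvKey (lines.headD "")
    let bottom := pvKey (lines.getLastD "")
    let st1 := if top ≠ "" then (st.1.insert top (st.1.getD top 0 + 1), st.2) else st
    if bottom ≠ "" then (st1.1, st1.2.insert bottom (st1.2.getD bottom 0 + 1)) else st1

def remove_repeated_headers_py (page_lines_list : List (List String)) : List String :=
  let pages : Int := page_lines_list.length
  let counts := page_lines_list.foldl pvStep (PySem.Dict.empty, PySem.Dict.empty)
  let headers_to_remove : PySem.Set String :=
    PySem.Set.ofList ((counts.1.items.filter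
      (fun p => decide (p.2 > max 1 (PySem.Int.floordiv pages 2)))).map Prod.fst)
  let footers_to_remove : PySem.Set String :=
    PySem.Set.ofList ((counts.2.items.filter
      (fun p => decide (p.2 > max 1 (PySem.Int.floordiv pages 2)))).map Prod.fst)
  page_lines_list.foldl (fun out lines =>
    (PySem.List.enumerate lines).foldl (fun (out : List String) (il : Int × String) =>
      if il.1 = 0 ∧ headers_to_remove.contains il.2 then out
      else if il.1 = (lines.length : Int) - 1 ∧ footers_to_remove.contains il.2 then out
      else out ++ [il.2]) out) []

-- ===== PORT B =====
-- B's outer while loop over the sorted key list: each iteration takes one run of equal keys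
-- (the inner 'while keys[j] == keys[i]: j += 1' is the takeWhile; 'i = j' continues after the run,
-- i.e. on the dropWhile remainder, since takeWhile ++ dropWhile = the list).
def pvRunScan (thr : Int) (freq : PySem.Set String) : List String → PySem.Set String
  | [] => freq
  | k :: rest =>
    let run := rest.takeWhile (fun x => x == k)
    let freq' := if k ≠ "" ∧ (1 + (run.length : Int)) > thr then PySem.Set.add freq k else freq
    pvRunScan thr freq' (rest.dropWhile (fun x => x == k))
termination_by l => l.length
decreasing_by
  have := (List.dropWhile_sublist (l := rest) (fun x => x == k)).length_le
  simp only [List.length_cons]; omega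

-- B's helper 'frequent(keys)': sort, then scan the runs
def pvFrequent (thr : Int) (keys : List String) : PySem.Set String :=
  pvRunScan thr PySem.Set.empty (PySem.List.sorted keys (fun x => x) false)

def remove_repeated_headers_py_alt (page_lines_list : List (List String)) : List String :=
  let thr : Int := max 1 (PySem.Int.floordiv page_lines_list.length 2)
  let nonempty := page_lines_list.filter (fun l => !l.isEmpty)
  let heads := pvFrequent thr (nonempty.map (fun l => pvKey (l.headD "")))
  let feet := pvFrequent thr (nonempty.map (fun l => pvKey (l.getLastD "")))
  nonempty.foldl (fun out lines =>
    let start : Int := if heads.contains (lines.headD "") then 1 else 0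
    let stop : Int := (lines.length : Int) - (if feet.contains (lines.getLastD "") then 1 else 0)
    out ++ PySem.List.slice lines (some start) (some stop)) []

-- ===== PRECONDITION & SPEC =====
def Spec_remove_repeated_headers_py (page_lines_list : List (List String)) (out : List String) : Prop := out = remove_repeated_headers_py_alt page_lines_list
instance (page_lines_list : List (List String)) (out : List String) : Decidable (Spec_remove_repeated_headers_py page_lines_list out) := by unfold Spec_remove_repeated_headers_py; infer_instance

-- ===== CLAIM (what is proved, stated in full; the proofs are below) =====
def Claim_equal_remove_repeated_headers_py : Prop := ∀ (page_lines_list : List (List String)), Dom_remove_repeated_headers_py page_lines_list → Spec_remove_repeated_headers_py page_lines_list (remove_repeated_headers_py page_lines_list)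

-- ===== LEMMAS AND PROOFS =====

theorem pvStep_fst (d1 d2 : PySem.Dict String Int) (lines : List String) :
    (pvStep (d1, d2) lines).1 = if lines.isEmpty then d1
      else if pvKey (lines.headD "") ≠ "" then
        d1.insert (pvKey (lines.headD "")) (d1.getD (pvKey (lines.headD "")) 0 + 1)
      else d1 := by
  rw [pvStep]
  split_ifs with h1 h2 <;> simp_all <;> (split <;> rfl)

theorem pvStep_snd (d1 d2 : PySem.Dict String Int) (lines : List String) :
    (pvStep (d1, d2) lines).2 = if lines.isEmpty then d2
      else if pvKey (lines.getLastD "") ≠ "" then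
        d2.insert (pvKey (lines.getLastD "")) (d2.getD (pvKey (lines.getLastD "")) 0 + 1)
      else d2 := by
  rw [pvStep]
  split_ifs with h1 h2 <;> simp_all <;> (split <;> rfl)

theorem pvFold_fst_getD (pls : List (List String)) (d1 d2 : PySem.Dict String Int) (k : String)
    (hk : k ≠ "") :
    ((pls.foldl pvStep (d1, d2)).1).getD k 0
      = d1.getD k 0 + (((pls.filter (fun l => !l.isEmpty)).map (fun l => pvKey (l.headD ""))).count k : Int) := by
  induction pls generalizing d1 d2 with
  | nil => simp
  | cons l rest ih =>
    rw [List.foldl_cons, show pvStep (d1, d2) l = ((pvStep (d1, d2) l).1, (pvStep (d1, d2) l).2) from rfl,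
      ih _ _, pvStep_fst]
    set t := pvKey (l.headD "") with hT
    by_cases hl : l.isEmpty
    · rw [if_pos (c := l.isEmpty = true) hl, List.filter_cons,
        if_neg (c := (!l.isEmpty) = true) (by simp [hl])]
    · rw [if_neg (c := l.isEmpty = true) (by simp [hl]), List.filter_cons,
        if_pos (c := (!l.isEmpty) = true) (by simp [hl]), List.map_cons, List.count_cons]
      rw [← hT]
      by_cases ht : t = k
      · rw [ht, if_pos hk, PySem.Dict.getD_insert_self, if_pos (by simp)]
        push_cast
        ring
      · rw [if_neg (c := (t == k) = true) (by simp only [beq_iff_eq]; exact ht)]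
        have h2 : (if t ≠ "" then d1.insert t (d1.getD t 0 + 1) else d1).getD k 0 = d1.getD k 0 := by
          split_ifs with h
          · exact PySem.Dict.getD_insert_of_ne _ _ _ (fun h' => ht h'.symm)
          · rfl
        rw [h2]
        push_cast
        ring

theorem pvFold_snd_getD (pls : List (List String)) (d1 d2 : PySem.Dict String Int) (k : String)
    (hk : k ≠ "") :
    ((pls.foldl pvStep (d1, d2)).2).getD k 0
      = d2.getD k 0 + (((pls.filter (fun l => !l.isEmpty)).map (fun l => pvKey (l.getLastD ""))).count k : Int) := by
  induction pls generalizing d1 d2 with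
  | nil => simp
  | cons l rest ih =>
    rw [List.foldl_cons, show pvStep (d1, d2) l = ((pvStep (d1, d2) l).1, (pvStep (d1, d2) l).2) from rfl,
      ih _ _, pvStep_snd]
    set t := pvKey (l.getLastD "") with hT
    by_cases hl : l.isEmpty
    · rw [if_pos (c := l.isEmpty = true) hl, List.filter_cons,
        if_neg (c := (!l.isEmpty) = true) (by simp [hl])]
    · rw [if_neg (c := l.isEmpty = true) (by simp [hl]), List.filter_cons,
        if_pos (c := (!l.isEmpty) = true) (by simp [hl]), List.map_cons, List.count_cons]
      rw [← hT]
      by_cases ht : t = k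
      · rw [ht, if_pos hk, PySem.Dict.getD_insert_self, if_pos (by simp)]
        push_cast
        ring
      · rw [if_neg (c := (t == k) = true) (by simp only [beq_iff_eq]; exact ht)]
        have h2 : (if t ≠ "" then d2.insert t (d2.getD t 0 + 1) else d2).getD k 0 = d2.getD k 0 := by
          split_ifs with h
          · exact PySem.Dict.getD_insert_of_ne _ _ _ (fun h' => ht h'.symm)
          · rfl
        rw [h2]
        push_cast
        ring

theorem pvFold_fst_getD_empty (pls : List (List String)) (d1 d2 : PySem.Dict String Int)
    (h1 : d1.getD "" 0 = 0) :
    ((pls.foldl pvStep (d1, d2)).1).getD "" 0 = 0 := by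
  induction pls generalizing d1 d2 with
  | nil => simpa using h1
  | cons l rest ih =>
    rw [List.foldl_cons, show pvStep (d1, d2) l = ((pvStep (d1, d2) l).1, (pvStep (d1, d2) l).2) from rfl,
      ih _ _]
    rw [pvStep_fst]
    split_ifs with hl hT
    · exact h1
    · rw [PySem.Dict.getD_insert_of_ne _ _ _ (fun h' => hT h'.symm)]; exact h1
    · exact h1

theorem pvFold_snd_getD_empty (pls : List (List String)) (d1 d2 : PySem.Dict String Int)
    (h2 : d2.getD "" 0 = 0) :
    ((pls.foldl pvStep (d1, d2)).2).getD "" 0 = 0 := by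
  induction pls generalizing d1 d2 with
  | nil => simpa using h2
  | cons l rest ih =>
    rw [List.foldl_cons, show pvStep (d1, d2) l = ((pvStep (d1, d2) l).1, (pvStep (d1, d2) l).2) from rfl,
      ih _ _]
    rw [pvStep_snd]
    split_ifs with hl hT
    · exact h2
    · rw [PySem.Dict.getD_insert_of_ne _ _ _ (fun h' => hT h'.symm)]; exact h2
    · exact h2

theorem pvFold_nodup (pls : List (List String)) (d1 d2 : PySem.Dict String Int)
    (h1 : d1.keys.Nodup) (h2 : d2.keys.Nodup) :
    ((pls.foldl pvStep (d1, d2)).1).keys.Nodup ∧ ((pls.foldl pvStep (d1, d2)).2).keys.Nodup := by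
  induction pls generalizing d1 d2 with
  | nil => exact ⟨h1, h2⟩
  | cons l rest ih =>
    rw [List.foldl_cons, show pvStep (d1, d2) l = ((pvStep (d1, d2) l).1, (pvStep (d1, d2) l).2) from rfl]
    refine ih _ _ ?_ ?_
    · rw [pvStep_fst]; split_ifs
      · exact h1
      · exact PySem.Dict.nodup_keys_insert _ _ _ h1
      · exact h1
    · rw [pvStep_snd]; split_ifs
      · exact h2
      · exact PySem.Dict.nodup_keys_insert _ _ _ h2
      · exact h2

-- membership in A's removal set ↔ the dict count exceeds the threshold
theorem pvSet_mem (d : PySem.Dict String Int) (hnd : d.keys.Nodup) (thr : Int) (hthr : 1 ≤ thr)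
    (l : String) :
    (PySem.Set.ofList ((d.items.filter (fun p => decide (p.2 > thr))).map Prod.fst)).contains l
      = decide (thr < d.getD l 0) := by
  rw [Bool.eq_iff_iff]
  simp only [PySem.Set.contains, List.contains_iff_mem, PySem.Set.mem_ofList, decide_eq_true_eq]
  constructor
  · intro h
    obtain ⟨p, hpf, rfl⟩ := List.mem_map.mp h
    obtain ⟨hpi, hpt⟩ := List.mem_filter.mp hpf
    have hg : d.get? p.1 = some p.2 :=
      (PySem.Dict.get?_eq_some_iff_mem_items d p.1 p.2 hnd).mpr (by simpa using hpi)
    rw [PySem.Dict.getD_eq_get?_getD, hg]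
    simpa using hpt
  · intro h
    rcases hg : d.get? l with _ | c
    · rw [PySem.Dict.getD_eq_get?_getD, hg] at h; simp at h; omega
    · rw [PySem.Dict.getD_eq_get?_getD, hg] at h
      exact List.mem_map.mpr ⟨(l, c), List.mem_filter.mpr
        ⟨PySem.Dict.mem_items_of_get?_eq_some d hg, by simp at h ⊢; omega⟩, rfl⟩

-- B's run scan on a sorted (Pairwise ≤) key list collects exactly the non-empty keys whose count exceeds thr
theorem pvRunScan_mem_aux (thr : Int) (hthr : 1 ≤ thr) (n : Nat) :
    ∀ (keys : List String), keys.length ≤ n → ∀ (freq : PySem.Set String),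
      keys.Pairwise (· ≤ ·) → ∀ l,
      (l ∈ pvRunScan thr freq keys ↔ l ∈ freq ∨ (l ≠ "" ∧ thr < (keys.count l : Int))) := by
  induction n with
  | zero =>
    intro keys hlen freq _ l
    rw [List.length_eq_zero_iff.mp (Nat.le_zero.mp hlen)]
    simp [pvRunScan]
    omega
  | succ n ih =>
    intro keys hlen freq hs l
    cases keys with
    | nil =>
      simp [pvRunScan]
      omega
    | cons k rest =>
      rw [pvRunScan]
      have hsub := List.dropWhile_sublist (l := rest) (fun x => x == k)
      have hd : rest.dropWhile (fun x => x == k) |>.Pairwise (· ≤ ·) :=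
        (List.pairwise_cons.mp hs).2.sublist hsub
      have hlen' : (rest.dropWhile (fun x => x == k)).length ≤ n := by
        have := hsub.length_le
        simp only [List.length_cons] at hlen
        omega
      rw [ih _ hlen' _ hd l]
      have hrest := (List.pairwise_cons.mp hs).1
      -- k does not occur in the dropWhile remainder
      have hknot : k ∉ rest.dropWhile (fun x => x == k) := by
        intro hmem
        rcases he : rest.dropWhile (fun x => x == k) with _ | ⟨h0, t⟩
        · rw [he] at hmem; simp at hmem
        · have hh0 : (h0 == k) = false := by
            have := List.head_dropWhile_not (l := rest) (fun x => x == k) (by rw [he]; simp)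
            simpa [he] using this
          have hh0k : h0 ≠ k := by simpa using hh0
          have hklt : k < h0 := lt_of_le_of_ne (hrest h0 (hsub.mem (by rw [he]; simp))) (Ne.symm hh0k)
          rw [he] at hmem
          rcases List.mem_cons.mp hmem with rfl | hmt
          · exact absurd rfl hh0k
          · have := (List.pairwise_cons.mp (he ▸ hd)).1 k hmt
            exact absurd rfl (ne_of_gt (lt_of_lt_of_le hklt this))
      -- counts: split rest into the run and the remainder
      have hsplit : rest = rest.takeWhile (fun x => x == k) ++ rest.dropWhile (fun x => x == k) :=
        (List.takeWhile_append_dropWhile).symm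
      have hcount_k : (k :: rest).count k
          = 1 + (rest.takeWhile (fun x => x == k)).length := by
        rw [List.count_cons_self]
        conv_lhs => rw [hsplit]
        rw [List.count_append]
        have hz : (rest.dropWhile (fun x => x == k)).count k = 0 :=
          List.count_eq_zero.mpr hknot
        have hrun : (rest.takeWhile (fun x => x == k)).count k
            = (rest.takeWhile (fun x => x == k)).length :=
          List.count_eq_length.mpr (fun b hb => by
            have hbk : b = k := by simpa using List.mem_takeWhile_imp hb
            exact hbk.symm)
        omega
      have hcount_ne : ∀ x, x ≠ k → (k :: rest).count x
          = (rest.dropWhile (fun y => y == k)).count x := by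
        intro x hx
        rw [List.count_cons, if_neg (by simpa using fun h => hx h.symm)]
        conv_lhs => rw [hsplit]
        rw [List.count_append]
        have hz : (rest.takeWhile (fun y => y == k)).count x = 0 :=
          List.count_eq_zero.mpr (fun hmem => hx (by simpa using List.mem_takeWhile_imp hmem))
        omega
      -- membership in freq' and conclude
      by_cases hlk : l = k
      · subst hlk
        have hzero : (rest.dropWhile (fun x => x == l)).count l = 0 := List.count_eq_zero.mpr hknot
        rw [hzero]
        have hnn : ¬ thr < ((0 : Nat) : Int) := by omega
        have hiff : (l ≠ "" ∧ thr < (((l :: rest).count l : Nat) : Int))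
            ↔ (l ≠ "" ∧ (1 + ((rest.takeWhile (fun x => x == l)).length : Int)) > thr) := by
          rw [hcount_k]
          constructor <;> rintro ⟨ha, hb⟩ <;> exact ⟨ha, by push_cast at hb ⊢; omega⟩
        rw [hiff]
        split_ifs with hc
        · simp only [PySem.Set.mem_add]
          simp [hc]
        · simp [hc]
          intro _ h
          exact absurd h (by omega)
      · rw [← hcount_ne l hlk]
        split_ifs with hc
        · simp [PySem.Set.mem_add, hlk]
        · rfl

theorem pvRunScan_mem (thr : Int) (hthr : 1 ≤ thr) (keys : List String) (freq : PySem.Set String)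
    (hs : keys.Pairwise (· ≤ ·)) (l : String) :
    l ∈ pvRunScan thr freq keys ↔ l ∈ freq ∨ (l ≠ "" ∧ thr < (keys.count l : Int)) :=
  pvRunScan_mem_aux thr hthr keys.length keys le_rfl freq hs l

-- B's frequent(keys) membership ↔ the key is non-empty and its count in keys exceeds thr
theorem pvFrequent_contains (thr : Int) (hthr : 1 ≤ thr) (keys : List String) (l : String) :
    (pvFrequent thr keys).contains l = decide (l ≠ "" ∧ thr < (keys.count l : Int)) := by
  rw [Bool.eq_iff_iff]
  simp only [PySem.Set.contains, List.contains_iff_mem, decide_eq_true_eq]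
  rw [pvFrequent, pvRunScan_mem thr hthr _ _ (PySem.List.sorted_pairwise keys (fun x => x)) l,
    (PySem.List.sorted_perm keys (fun x => x) false).count_eq]
  simp [PySem.Set.empty]

theorem pvDropLastFilter (ys : List String) (s : Int) :
    ((PySem.List.enumerate ys s).filter (fun il => decide (il.1 ≠ s + (ys.length : Int) - 1))).map (fun il => il.2)
      = ys.dropLast := by
  rcases List.eq_nil_or_concat ys with rfl | ⟨l', a, rfl⟩
  · simp [PySem.List.enumerate_nil]
  · rw [List.concat_eq_append, PySem.List.enumerate_append, List.filter_append]
    have hlast : (PySem.List.enumerate [a] (s + (l'.length : Int))).filter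
        (fun il => decide (il.1 ≠ s + ((l' ++ [a]).length : Int) - 1)) = [] := by
      simp [PySem.List.enumerate_cons, PySem.List.enumerate_nil]
      omega
    have hself : (PySem.List.enumerate l' s).filter
        (fun il => decide (il.1 ≠ s + ((l' ++ [a]).length : Int) - 1)) = PySem.List.enumerate l' s := by
      apply List.filter_eq_self.mpr
      intro il hil
      obtain ⟨k, hk, rfl⟩ := (PySem.List.mem_enumerate_iff _ _ _).mp hil
      simp
      omega
    rw [hlast, hself, List.append_nil, PySem.List.map_snd_enumerate, List.dropLast_concat]

-- A's per-page indexed filter loop equals a slice of the page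
theorem pvPage (lines : List String) (hne : lines ≠ []) (P Q : String → Bool) (acc : List String) :
    (PySem.List.enumerate lines).foldl (fun (out : List String) (il : Int × String) =>
        if il.1 = 0 ∧ P il.2 then out
        else if il.1 = (lines.length : Int) - 1 ∧ Q il.2 then out
        else out ++ [il.2]) acc
      = acc ++ PySem.List.slice lines (some (if P (lines.headD "") then 1 else 0))
          (some ((lines.length : Int) - (if Q (lines.getLastD "") then 1 else 0))) := by
  have hcongr := PySem.List.foldl_congr_mem
    (l := PySem.List.enumerate lines) (init := acc)
    (f := fun (out : List String) (il : Int × String) =>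
        if il.1 = 0 ∧ P il.2 then out
        else if il.1 = (lines.length : Int) - 1 ∧ Q il.2 then out
        else out ++ [il.2])
    (g := fun (out : List String) (il : Int × String) =>
        if ¬ (il.1 = 0 ∧ P il.2) ∧ ¬ (il.1 = (lines.length : Int) - 1 ∧ Q il.2) then out ++ [il.2] else out)
    (by
      intro acc il _
      by_cases h1 : il.1 = 0 ∧ P il.2 <;> by_cases h2 : il.1 = (lines.length : Int) - 1 ∧ Q il.2 <;>
        simp [h1, h2])
  rw [hcongr, PySem.List.foldl_append_ite
    (p := fun (il : Int × String) => ¬ (il.1 = 0 ∧ P il.2) ∧ ¬ (il.1 = (lines.length : Int) - 1 ∧ Q il.2))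
    (f := fun (il : Int × String) => il.2)]
  congr 1
  obtain ⟨l0, rest, rfl⟩ := List.exists_cons_of_ne_nil hne
  have hlenc : (((l0 :: rest).length : Nat) : Int) = (rest.length : Int) + 1 := by simp
  have hheadP : P ((l0 :: rest).headD "") = P l0 := rfl
  have hlastAll : ∀ (k : Nat) (hk : k < (l0 :: rest).length), ((k : Int) = (rest.length : Int)) →
      (l0 :: rest)[k] = (l0 :: rest).getLastD "" := by
    intro k hk hke
    have hkk : k = rest.length := by omega
    subst hkk
    rw [List.getLastD_eq_getLast?, List.getLast?_eq_getElem?]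
    simp only [List.length_cons, Nat.add_sub_cancel]
    rw [List.getElem?_eq_getElem (by simp)]
    rfl
  by_cases hP : P ((l0 :: rest).headD "") = true <;> by_cases hQ : Q ((l0 :: rest).getLastD "") = true
  · -- header and footer both frequent
    rw [if_pos hP, if_pos hQ]
    have hfilter : ((PySem.List.enumerate (l0 :: rest)).filter
        (fun il => decide (¬ (il.1 = 0 ∧ P il.2) ∧ ¬ (il.1 = ((l0 :: rest).length : Int) - 1 ∧ Q il.2)))).map (fun il => il.2)
        = rest.dropLast := by
      rw [PySem.List.enumerate_cons, List.filter_cons,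
        if_neg (by rw [hheadP] at hP; simp [hP]), ← pvDropLastFilter rest (0 + 1)]
      congr 1
      apply List.filter_congr
      intro il hil
      obtain ⟨k, hk, rfl⟩ := (PySem.List.mem_enumerate_iff _ _ _).mp hil
      simp only [decide_eq_decide]
      constructor
      · rintro ⟨h1, h2⟩ hEq
        apply h2
        refine ⟨by omega, ?_⟩
        have hER : rest[k] = (l0 :: rest).getLastD "" := by
          have h3 := hlastAll (k + 1) (by simp; omega) (by push_cast; omega)
          simpa using h3
        rw [hER]
        exact hQ
      · intro hB
        refine ⟨by rintro ⟨h0, _⟩; omega, by rintro ⟨hEq, _⟩; exact hB (by omega)⟩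
    have hslice : PySem.List.slice (l0 :: rest) (some 1) (some (((l0 :: rest).length : Int) - 1))
        = rest.dropLast := by
      rw [PySem.List.slice_toNat _ (by omega) (by simp only [List.length_cons]; push_cast; omega)]
      have h1 : ((((l0 :: rest).length : Nat) : Int) - 1).toNat = rest.length := by
        simp only [List.length_cons]; omega
      rw [h1, List.dropLast_eq_take]
      norm_num
    rw [hfilter, hslice]
  · -- header frequent only
    rw [if_pos hP, if_neg hQ]
    have hfilter : ((PySem.List.enumerate (l0 :: rest)).filter
        (fun il => decide (¬ (il.1 = 0 ∧ P il.2) ∧ ¬ (il.1 = ((l0 :: rest).length : Int) - 1 ∧ Q il.2)))).map (fun il => il.2)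
        = rest := by
      rw [PySem.List.enumerate_cons, List.filter_cons,
        if_neg (by rw [hheadP] at hP; simp [hP])]
      have hself : (PySem.List.enumerate rest (0 + 1)).filter
          (fun il => decide (¬ (il.1 = 0 ∧ P il.2) ∧ ¬ (il.1 = ((l0 :: rest).length : Int) - 1 ∧ Q il.2)))
          = PySem.List.enumerate rest (0 + 1) := by
        apply List.filter_eq_self.mpr
        intro il hil
        obtain ⟨k, hk, rfl⟩ := (PySem.List.mem_enumerate_iff _ _ _).mp hil
        simp only [decide_eq_true_eq]
        refine ⟨by rintro ⟨h0, _⟩; omega, ?_⟩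
        rintro ⟨hEq, hQ'⟩
        have hER : rest[k] = (l0 :: rest).getLastD "" := by
          have h3 := hlastAll (k + 1) (by simp; omega) (by push_cast; omega)
          simpa using h3
        rw [hER] at hQ'
        exact hQ hQ'
      rw [hself, PySem.List.map_snd_enumerate]
    have hslice : PySem.List.slice (l0 :: rest) (some 1) (some (((l0 :: rest).length : Int) - 0))
        = rest := by
      rw [PySem.List.slice_toNat _ (by omega) (by simp only [List.length_cons]; push_cast; omega)]
      have h1 : ((((l0 :: rest).length : Nat) : Int) - 0).toNat = rest.length + 1 := by
        simp only [List.length_cons]; omega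
      rw [h1]
      norm_num
    rw [hfilter, hslice]
  · -- footer frequent only
    rw [if_neg hP, if_pos hQ]
    have hfilter : ((PySem.List.enumerate (l0 :: rest)).filter
        (fun il => decide (¬ (il.1 = 0 ∧ P il.2) ∧ ¬ (il.1 = ((l0 :: rest).length : Int) - 1 ∧ Q il.2)))).map (fun il => il.2)
        = (l0 :: rest).dropLast := by
      rw [← pvDropLastFilter (l0 :: rest) 0]
      congr 1
      apply List.filter_congr
      intro il hil
      obtain ⟨k, hk, rfl⟩ := (PySem.List.mem_enumerate_iff _ _ _).mp hil
      simp only [decide_eq_decide]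
      constructor
      · rintro ⟨h1, h2⟩ hEq
        apply h2
        refine ⟨by omega, ?_⟩
        rw [hlastAll k hk (by omega)]
        exact hQ
      · intro hB
        refine ⟨?_, by rintro ⟨hEq, _⟩; exact hB (by omega)⟩
        rintro ⟨h0, hP'⟩
        have hk0 : k = 0 := by omega
        subst hk0
        rw [hheadP] at hP
        simp at hP'
        exact hP hP'
    have hslice : PySem.List.slice (l0 :: rest) (some 0) (some (((l0 :: rest).length : Int) - 1))
        = (l0 :: rest).dropLast := by
      rw [PySem.List.slice_toNat _ (by omega) (by simp only [List.length_cons]; push_cast; omega)]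
      have h1 : ((((l0 :: rest).length : Nat) : Int) - 1).toNat = rest.length := by
        simp only [List.length_cons]; omega
      rw [h1, List.dropLast_eq_take]
      simp only [List.length_cons, Nat.add_sub_cancel]
      norm_num
    rw [hfilter, hslice]
  · -- neither frequent
    rw [if_neg hP, if_neg hQ]
    have hself : (PySem.List.enumerate (l0 :: rest)).filter
        (fun il => decide (¬ (il.1 = 0 ∧ P il.2) ∧ ¬ (il.1 = ((l0 :: rest).length : Int) - 1 ∧ Q il.2)))
        = PySem.List.enumerate (l0 :: rest) := by
      apply List.filter_eq_self.mpr
      intro il hil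
      obtain ⟨k, hk, rfl⟩ := (PySem.List.mem_enumerate_iff _ _ _).mp hil
      simp only [decide_eq_true_eq]
      refine ⟨?_, ?_⟩
      · rintro ⟨h0, hP'⟩
        have hk0 : k = 0 := by omega
        subst hk0
        rw [hheadP] at hP
        simp at hP'
        exact hP hP'
      · rintro ⟨hEq, hQ'⟩
        rw [hlastAll k hk (by omega)] at hQ'
        exact hQ hQ'
    have hslice : PySem.List.slice (l0 :: rest) (some 0) (some (((l0 :: rest).length : Int) - 0))
        = l0 :: rest := by
      rw [PySem.List.slice_toNat _ (by omega) (by simp only [List.length_cons]; push_cast; omega)]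
      have h1 : ((((l0 :: rest).length : Nat) : Int) - 0).toNat = rest.length + 1 := by
        simp only [List.length_cons]; omega
      rw [h1]
      simp [List.take_of_length_le]
    rw [hself, PySem.List.map_snd_enumerate, hslice]

theorem pvMain (pls : List (List String)) :
    remove_repeated_headers_py pls = remove_repeated_headers_py_alt pls := by
  simp only [remove_repeated_headers_py, remove_repeated_headers_py_alt]
  set thr : Int := max 1 (PySem.Int.floordiv (pls.length : Int) 2) with hthr
  have hthr1 : 1 ≤ thr := le_max_left _ _
  set HA : PySem.Set String :=
    PySem.Set.ofList ((((pls.foldl pvStep (PySem.Dict.empty, PySem.Dict.empty)).1).items.filter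
      (fun p => decide (p.2 > thr))).map Prod.fst) with hHA
  set FA : PySem.Set String :=
    PySem.Set.ofList ((((pls.foldl pvStep (PySem.Dict.empty, PySem.Dict.empty)).2).items.filter
      (fun p => decide (p.2 > thr))).map Prod.fst) with hFA
  have hnodup := pvFold_nodup pls PySem.Dict.empty PySem.Dict.empty
    (PySem.Dict.nodup_keys_empty) (PySem.Dict.nodup_keys_empty)
  -- A's set membership test agrees with B's frequent-run membership test, key by key
  have hHeq : ∀ l, HA.contains l
      = (pvFrequent thr ((pls.filter (fun l => !l.isEmpty)).map (fun l => pvKey (l.headD "")))).contains l := by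
    intro l
    rw [hHA, pvSet_mem _ hnodup.1 thr hthr1, pvFrequent_contains _ hthr1]
    by_cases hl0 : l = ""
    · subst hl0
      rw [pvFold_fst_getD_empty pls _ _ (by simp)]
      simp
      omega
    · rw [pvFold_fst_getD pls _ _ l hl0]
      simp [hl0]
  have hFeq : ∀ l, FA.contains l
      = (pvFrequent thr ((pls.filter (fun l => !l.isEmpty)).map (fun l => pvKey (l.getLastD "")))).contains l := by
    intro l
    rw [hFA, pvSet_mem _ hnodup.2 thr hthr1, pvFrequent_contains _ hthr1]
    by_cases hl0 : l = ""
    · subst hl0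
      rw [pvFold_snd_getD_empty pls _ _ (by simp)]
      simp
      omega
    · rw [pvFold_snd_getD pls _ _ l hl0]
      simp [hl0]
  -- A's outer loop: skip empty pages, slice the rest (via pvPage), then fold over the filtered list
  have hA : pls.foldl (fun out lines =>
      (PySem.List.enumerate lines).foldl (fun (out : List String) (il : Int × String) =>
        if il.1 = 0 ∧ HA.contains il.2 then out
        else if il.1 = (lines.length : Int) - 1 ∧ FA.contains il.2 then out
        else out ++ [il.2]) out) []
      = (pls.filter (fun l => !l.isEmpty)).foldl (fun out lines =>
          out ++ PySem.List.slice lines (some (if HA.contains (lines.headD "") then 1 else 0))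
            (some ((lines.length : Int) - (if FA.contains (lines.getLastD "") then 1 else 0)))) [] := by
    have hc := PySem.List.foldl_congr_mem (l := pls) (init := ([] : List String))
      (f := fun out lines =>
        (PySem.List.enumerate lines).foldl (fun (out : List String) (il : Int × String) =>
          if il.1 = 0 ∧ HA.contains il.2 then out
          else if il.1 = (lines.length : Int) - 1 ∧ FA.contains il.2 then out
          else out ++ [il.2]) out)
      (g := fun out lines =>
        if !lines.isEmpty then
          out ++ PySem.List.slice lines (some (if HA.contains (lines.headD "") then 1 else 0))
            (some ((lines.length : Int) - (if FA.contains (lines.getLastD "") then 1 else 0)))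
        else out)
      (by
        intro acc lines _
        dsimp only
        by_cases hl : lines = []
        · subst hl; simp [PySem.List.enumerate_nil]
        · rw [pvPage lines hl, if_pos (c := (!lines.isEmpty) = true) (by simp [hl])])
    rw [hc, PySem.List.foldl_if_eq_foldl_filter]
  rw [hA]
  apply PySem.List.foldl_congr_mem
  intro acc lines _
  rw [hHeq, hFeq]

-- ===== VERDICT (by name: the statement is the Claim_ definition above) =====
theorem remove_repeated_headers_py_spec : Claim_equal_remove_repeated_headers_py := by
  intro pls _
  exact pvMain pls
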